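-- pv_equiv track=rewrite | github.com/hyeeun1031/coding-practice | 프로그래머스/3/12927. 야근 지수/야근 지수.py | solution
-- ===== SOURCE A (Python) =====
-- import heapq
--
-- def solution(n, works):
--     # 총 작업량이 n 이하라면 모두 처리 가능
--     if sum(works) <= n:
--         return 0
--
--     # 최대 힙을 만들기 위해 음수로 변환
--     heap = [-w for w in works]
--     heapq.heapify(heap)
--
--     for _ in range(n):
--         largest = -heapq.heappop(heap)
--         if largest == 0:
--             break
--         largest -= 1
--         heapq.heappush(heap, -largest)
--
--     # 야근 피로도 계산
--     return sum(x * x for x in map(lambda x: -x, heap))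
-- ===== SOURCE B (Python) =====
-- def solution(n, works):
--     total = sum(works)
--     if total <= n:
--         return 0
--     if n <= 0:
--         return sum(w * w for w in works)
--     # bucket water-filling: lower the whole top level at once instead of one unit at a time
--     cnt = {}
--     for w in works:
--         cnt[w] = cnt.get(w, 0) + 1
--     v = max(works)
--     c = cnt.get(v, 0)      # number of elements currently sitting at level v
--     k = n
--     while k >= c:
--         k -= c
--         v -= 1
--         c += cnt.get(v, 0)
--     return sum(w * w for w in works if w < v) + (c - k) * v * v + k * (v - 1) * (v - 1)
-- ===== Notes on version B (the rewrite author's own statement) =====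
-- stated objective: alternative
-- what changed: A simulates the process unit by unit with a max-heap (n heappop/heappush rounds); B builds a value->count dict once and water-fills level by level, lowering all c elements of the current top level in a single O(1) loop step and computing the final fatigue from the closing level in one pass.
import Mathlib
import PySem

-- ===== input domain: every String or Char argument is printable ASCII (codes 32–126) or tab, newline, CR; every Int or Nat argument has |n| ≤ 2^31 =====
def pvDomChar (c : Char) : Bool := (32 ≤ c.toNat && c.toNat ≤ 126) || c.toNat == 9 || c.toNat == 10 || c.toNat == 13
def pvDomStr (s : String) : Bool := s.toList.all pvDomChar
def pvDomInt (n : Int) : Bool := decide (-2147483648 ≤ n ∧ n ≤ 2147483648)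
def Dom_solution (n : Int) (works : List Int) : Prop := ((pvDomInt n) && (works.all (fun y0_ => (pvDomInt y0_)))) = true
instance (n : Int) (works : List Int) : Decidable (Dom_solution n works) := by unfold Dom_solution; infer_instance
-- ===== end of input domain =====

-- B replaces A's unit-by-unit heap simulation (n heap pops) by a bucket-count water-filling
-- loop that lowers a whole top level at once.

-- ===== PORT A =====
-- heapq is modeled by its observable behaviour: heappop removes a (first) minimal element
-- (PySem.List.min? + List.erase), heappush prepends; heapify is the identity on the modeled
-- state (the heap's internal array layout is not observable through pop / the final sum).
def heapLoop : Nat → List Int → List Int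
  | 0, heap => heap
  | Nat.succ k, heap =>
    match PySem.List.min? heap (fun x => x) with
    | none => heap          -- heappop of an empty heap: unreachable (works = [] returns in the first branch)
    | some m =>
      let largest := -m
      if largest = 0 then heap.erase m
      else heapLoop k (-(largest - 1) :: heap.erase m)

def solution (n : Int) (works : List Int) : Int :=
  if works.sum ≤ n then 0
  else
    (((heapLoop n.toNat (works.map (fun w => -w))).map (fun x => -x)).map
      (fun x => x * x)).sum

-- ===== PORT B =====
-- while k >= c: k -= c; v -= 1; c += cnt.get(v, 0)   (fuel n.toNat suffices: each pass consumes c ≥ 1 of k)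
def bLoop (cnt : PySem.Dict Int Int) : Nat → Int → Int → Int → Int × Int × Int
  | 0, k, v, c => (k, v, c)
  | Nat.succ fuel, k, v, c =>
    if c ≤ k then bLoop cnt fuel (k - c) (v - 1) (c + cnt.getD (v - 1) 0)
    else (k, v, c)

def solution_alt (n : Int) (works : List Int) : Int :=
  if works.sum ≤ n then 0
  else if n ≤ 0 then (works.map (fun w => w * w)).sum
  else
    let cnt := works.foldl (fun d w => d.insert w (d.getD w 0 + 1)) PySem.Dict.empty
    match PySem.List.max? works (fun x => x) with
    | none => 0             -- unreachable: works = [] is caught by the first branch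
    | some v0 =>
      match bLoop cnt n.toNat n v0 (cnt.getD v0 0) with
      | (k, v, c) =>
        ((works.filter (fun w => w < v)).map (fun w => w * w)).sum
          + (c - k) * v * v + k * (v - 1) * (v - 1)

-- ===== PRECONDITION & SPEC =====
def Spec_solution (n : Int) (works : List Int) (out : Int) : Prop := out = solution_alt n works
instance (n : Int) (works : List Int) (out : Int) : Decidable (Spec_solution n works out) := by unfold Spec_solution; infer_instance

-- ===== CLAIM (what is proved, stated in full; the proofs are below) =====
def Claim_equal_solution : Prop := ∀ (n : Int) (works : List Int), Dom_solution n works → Spec_solution n works (solution n works)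

-- ===== LEMMAS AND PROOFS =====

-- specification-side greedy: F k M = sum of squares after k unit decrements of the maximum
def mmax (M : Multiset Int) : Int := M.fold max 0

def F : Nat → Multiset Int → Int
  | 0, M => (M.map (fun x => x * x)).sum
  | Nat.succ k, M => F k ((mmax M - 1) ::ₘ M.erase (mmax M))

def clip (W : Multiset Int) (v : Int) : Multiset Int := W.map (fun w => min w v)

lemma le_mmax (M : Multiset Int) (a : Int) (ha : a ∈ M) : a ≤ mmax M := by
  induction M using Multiset.induction_on with
  | empty => simp at ha
  | cons b s ih =>
    rw [mmax, Multiset.fold_cons_left]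
    rcases Multiset.mem_cons.mp ha with h | h
    · subst h; exact le_max_left _ _
    · exact le_trans (ih h) (le_max_right _ _)

lemma mmax_le (M : Multiset Int) (v : Int) (hub : ∀ y ∈ M, y ≤ v) (h0 : 0 ≤ v) :
    mmax M ≤ v := by
  induction M using Multiset.induction_on with
  | empty => simpa [mmax] using h0
  | cons b s ih =>
    rw [mmax, Multiset.fold_cons_left]
    exact max_le (hub b (Multiset.mem_cons_self _ _))
      (ih fun y hy => hub y (Multiset.mem_cons_of_mem hy))

lemma mmax_spec (M : Multiset Int) (v : Int) (hv : v ∈ M) (hub : ∀ y ∈ M, y ≤ v)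
    (h0 : 0 ≤ v) : mmax M = v :=
  le_antisymm (mmax_le M v hub h0) (le_mmax M v hv)

lemma sum_nonpos_of_nonpos (M : Multiset Int) (h : ∀ y ∈ M, y ≤ 0) : M.sum ≤ 0 := by
  induction M using Multiset.induction_on with
  | empty => simp
  | cons b s ih =>
    rw [Multiset.sum_cons]
    have hb := h b (Multiset.mem_cons_self _ _)
    have hs := ih (fun y hy => h y (Multiset.mem_cons_of_mem hy))
    omega

lemma max_pos_of_sum_pos (M : Multiset Int) (v : Int) (hub : ∀ y ∈ M, y ≤ v)
    (hs : 0 < M.sum) : 1 ≤ v := by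
  by_contra hcon
  have : M.sum ≤ 0 := sum_nonpos_of_nonpos M (fun y hy => le_trans (hub y hy) (by omega))
  omega

-- (I) the heap loop computes F on the multiset of work values
lemma heapLoop_F : ∀ (k : Nat) (h : List Int),
    (k : Int) < (Multiset.map (fun x => -x) (↑h : Multiset Int)).sum →
    (((heapLoop k h).map (fun x => -x)).map (fun x => x * x)).sum
      = F k (Multiset.map (fun x => -x) (↑h : Multiset Int)) := by
  intro k
  induction k with
  | zero =>
    intro h _
    simp [heapLoop, F, Multiset.map_coe, Multiset.sum_coe]
  | succ k ih =>
    intro h hsum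
    rcases heq : PySem.List.min? h (fun x => x) with _ | m
    · rw [PySem.List.min?_eq_none_iff] at heq
      subst heq
      simp at hsum
      omega
    have hmem : m ∈ h := PySem.List.min?_mem heq
    have hmin : ∀ y ∈ h, m ≤ y := PySem.List.min?_isMin heq
    set W := Multiset.map (fun x : Int => -x) (↑h : Multiset Int) with hW
    have hub : ∀ y ∈ W, y ≤ -m := by
      intro y hy
      rcases Multiset.mem_map.mp hy with ⟨x, hx, rfl⟩
      have := hmin x (by exact_mod_cast hx)
      omega
    have hk0 : (0 : Int) ≤ (k : Int) := Int.natCast_nonneg k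
    have hWpos : 0 < W.sum := by push_cast at hsum; omega
    have hv1 : 1 ≤ -m := max_pos_of_sum_pos W (-m) hub hWpos
    have hmW : -m ∈ W := Multiset.mem_map.mpr ⟨m, by exact_mod_cast hmem, rfl⟩
    have hstep : heapLoop (k + 1) h = heapLoop k (-(-m - 1) :: h.erase m) := by
      have hm0 : ¬(-m = 0) := by omega
      simp only [heapLoop, heq, if_neg hm0]
    have hnew : Multiset.map (fun x : Int => -x) (↑(-(-m - 1) :: h.erase m) : Multiset Int)
        = (-m - 1) ::ₘ W.erase (-m) := by
      have hco : (↑(h.erase m) : Multiset Int) = (↑h : Multiset Int).erase m :=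
        (Multiset.coe_erase h m).symm
      have : (↑(-(-m - 1) :: h.erase m) : Multiset Int)
          = -(-m - 1) ::ₘ (↑(h.erase m) : Multiset Int) := rfl
      rw [this, Multiset.map_cons, hco,
        Multiset.map_erase (fun x : Int => -x) neg_injective m ↑h]
      rw [hW]
      congr 1
      omega
    have hesum : (W.erase (-m)).sum = W.sum - (-m) := by
      have h2 : ((-m) ::ₘ W.erase (-m)).sum = W.sum := by
        rw [Multiset.cons_erase hmW]
      rw [Multiset.sum_cons] at h2
      omega
    have ihh := ih (-(-m - 1) :: h.erase m) (by
      rw [hnew, Multiset.sum_cons]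
      push_cast at hsum ⊢
      omega)
    rw [hstep, ihh, hnew]
    have hmax : mmax W = -m := mmax_spec W (-m) hmW hub (by omega)
    have : F (k + 1) W = F k ((mmax W - 1) ::ₘ W.erase (mmax W)) := rfl
    rw [this, hmax]

lemma sumsq_split (M : Multiset Int) (v : Int) (hub : ∀ y ∈ M, y ≤ v) :
    (M.map (fun x => x * x)).sum
      = ((M.filter (fun w => w < v)).map (fun w => w * w)).sum + (M.count v : Int) * v * v := by
  induction M using Multiset.induction_on with
  | empty => simp
  | cons a s ih =>
    have ha := hub a (Multiset.mem_cons_self _ _)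
    have ihs := ih (fun y hy => hub y (Multiset.mem_cons_of_mem hy))
    rw [Multiset.map_cons, Multiset.sum_cons, Multiset.count_cons, Multiset.filter_cons]
    by_cases hav : a < v
    · rw [if_pos hav, if_neg (by omega)]
      rw [Multiset.singleton_add, Multiset.map_cons, Multiset.sum_cons, ihs]
      ring_nf
    · have hveq : a = v := by omega
      rw [if_neg hav, if_pos hveq.symm, Multiset.zero_add, ihs]
      subst hveq
      push_cast
      ring

lemma F_closed (k : Nat) (M : Multiset Int) (v : Int) (hv : 1 ≤ v)
    (hub : ∀ y ∈ M, y ≤ v) (hk : k < M.count v) :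
    F k M = ((M.filter (fun w => w < v)).map (fun w => w * w)).sum
      + ((M.count v : Int) - k) * v * v + (k : Int) * (v - 1) * (v - 1) := by
  induction k generalizing M with
  | zero =>
    rw [show F 0 M = (M.map (fun x => x * x)).sum from rfl, sumsq_split M v hub]
    push_cast
    ring
  | succ k ih =>
    have hvM : v ∈ M := Multiset.count_pos.mp (by omega)
    have hmax : mmax M = v := mmax_spec M v hvM hub (by omega)
    have hstep : F (k + 1) M = F k ((v - 1) ::ₘ M.erase v) := by
      rw [show F (k + 1) M = F k ((mmax M - 1) ::ₘ M.erase (mmax M)) from rfl, hmax]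
    set M' := (v - 1) ::ₘ M.erase v with hM'
    have hub' : ∀ y ∈ M', y ≤ v := by
      intro y hy
      rcases Multiset.mem_cons.mp hy with rfl | hy
      · omega
      · exact hub y (Multiset.mem_of_mem_erase hy)
    have hcount' : M'.count v = M.count v - 1 := by
      rw [hM', Multiset.count_cons, Multiset.count_erase_self, if_neg (by omega)]
      omega
    have ihM := ih M' hub' (by omega)
    have hfilter : M'.filter (fun w => w < v) = (v - 1) ::ₘ M.filter (fun w => w < v) := by
      rw [hM', Multiset.filter_cons, if_pos (by omega), Multiset.singleton_add]
      congr 1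
      conv_rhs => rw [← Multiset.cons_erase hvM]
      rw [Multiset.filter_cons, if_neg (by omega), Multiset.zero_add]
    rw [hstep, ihM, hfilter, Multiset.map_cons, Multiset.sum_cons, hcount']
    have h1 : (1 : Nat) ≤ M.count v := by omega
    push_cast [h1]
    ring

lemma F_chunk : ∀ (c : Nat) (M : Multiset Int) (v : Int) (k : Nat), 1 ≤ v →
    (∀ y ∈ M, y ≤ v) → M.count v = c → c ≤ k →
    F k M = F (k - c) (M.map (fun w => if w = v then v - 1 else w)) := by
  intro c
  induction c with
  | zero =>
    intro M v k hv hub hc _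
    have hmap : M.map (fun w => if w = v then v - 1 else w) = M := by
      have h : M.map (fun w => if w = v then v - 1 else w) = M.map id :=
        Multiset.map_congr rfl (fun x hx => by
          have hxv : x ≠ v := by
            intro h
            subst h
            have := Multiset.count_pos.mpr hx
            omega
          simp [hxv])
      rw [h, Multiset.map_id]
    rw [hmap, Nat.sub_zero]
  | succ c ih =>
    intro M v k hv hub hc hk
    have hvM : v ∈ M := Multiset.count_pos.mp (by omega)
    obtain ⟨k', rfl⟩ : ∃ k', k = k' + 1 := ⟨k - 1, by omega⟩
    have hmax : mmax M = v := mmax_spec M v hvM hub (by omega)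
    have hstep : F (k' + 1) M = F k' ((v - 1) ::ₘ M.erase v) := by
      rw [show F (k' + 1) M = F k' ((mmax M - 1) ::ₘ M.erase (mmax M)) from rfl, hmax]
    set M₁ := (v - 1) ::ₘ M.erase v with hM₁
    have hub₁ : ∀ y ∈ M₁, y ≤ v := by
      intro y hy
      rcases Multiset.mem_cons.mp hy with rfl | hy
      · omega
      · exact hub y (Multiset.mem_of_mem_erase hy)
    have hc₁ : M₁.count v = c := by
      rw [hM₁, Multiset.count_cons, Multiset.count_erase_self, if_neg (by omega)]
      omega
    have ihM := ih M₁ v k' hv hub₁ hc₁ (by omega)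
    rw [hstep, ihM]
    rw [show k' + 1 - (c + 1) = k' - c from by omega]
    congr 1
    rw [hM₁, Multiset.map_cons, if_neg (by omega)]
    conv_rhs => rw [← Multiset.cons_erase hvM]
    rw [Multiset.map_cons, if_pos rfl]

lemma clip_step (W : Multiset Int) (v : Int) :
    clip W (v - 1) = (clip W v).map (fun w => if w = v then v - 1 else w) := by
  rw [clip, clip, Multiset.map_map]
  refine Multiset.map_congr rfl (fun x _ => ?_)
  simp only [Function.comp]
  split_ifs with h <;> omega

lemma count_clip (W : Multiset Int) (v : Int) :
    (clip W v).count v = (W.filter (fun w => v ≤ w)).card := by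
  rw [clip, Multiset.count_map]
  congr 1
  exact Multiset.filter_congr (fun x _ => by constructor <;> intro <;> omega)

lemma sum_clip_step (W : Multiset Int) (v : Int) :
    (clip W (v - 1)).sum = (clip W v).sum - (W.filter (fun w => v ≤ w)).card := by
  induction W using Multiset.induction_on with
  | empty => simp [clip]
  | cons a s ih =>
    simp only [clip, Multiset.map_cons, Multiset.sum_cons, Multiset.filter_cons] at ih ⊢
    by_cases hva : v ≤ a
    · rw [if_pos hva, Multiset.card_add, Multiset.card_singleton]
      push_cast
      omega
    · rw [if_neg hva, Multiset.zero_add]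
      omega

lemma filter_clip (W : Multiset Int) (v : Int) :
    (clip W v).filter (fun w => w < v) = W.filter (fun w => w < v) := by
  rw [clip, Multiset.filter_map]
  have h1 : Multiset.filter ((fun w => w < v) ∘ (fun w => min w v)) W
      = Multiset.filter (fun w => w < v) W :=
    Multiset.filter_congr (fun x _ => by simp only [Function.comp]; omega)
  have h2 : Multiset.map (fun w => min w v) (Multiset.filter (fun w => w < v) W)
      = Multiset.map id (Multiset.filter (fun w => w < v) W) :=
    Multiset.map_congr rfl (fun x hx => by
      have := (Multiset.mem_filter.mp hx).2
      simp only [id]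
      omega)
  rw [h1, h2, Multiset.map_id]

lemma card_filter_pred (W : Multiset Int) (v : Int) :
    (W.filter (fun w => v - 1 ≤ w)).card
      = (W.filter (fun w => v ≤ w)).card + W.count (v - 1) := by
  induction W using Multiset.induction_on with
  | empty => simp
  | cons a s ih =>
    rw [Multiset.filter_cons, Multiset.filter_cons, Multiset.count_cons, Multiset.card_add,
      Multiset.card_add]
    split_ifs with h1 h2 h3 <;> simp_all <;> omega

lemma clip_ub (xs : Multiset Int) (v : Int) : ∀ y ∈ clip xs v, y ≤ v := by
  intro y hy
  rcases Multiset.mem_map.mp hy with ⟨x, _, rfl⟩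
  exact min_le_right _ _

-- terminal state of the bucket loop
lemma bStop (xs : List Int) (k v c : Int) (hv : 1 ≤ v) (hk0 : 0 ≤ k)
    (hc : c = (((↑xs : Multiset Int).filter (fun w => v ≤ w)).card : Int)) (hkc : k < c) :
    ((xs.filter (fun w => w < v)).map (fun w => w * w)).sum + (c - k) * v * v
        + k * (v - 1) * (v - 1)
      = F k.toNat (clip (↑xs) v) := by
  have hcount := count_clip (↑xs : Multiset Int) v
  have hkn : k.toNat < (clip (↑xs : Multiset Int) v).count v := by
    rw [hcount]; omega
  rw [F_closed k.toNat _ v hv (clip_ub _ v) hkn, filter_clip, hcount]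
  have hlist : ((↑xs : Multiset Int).filter (fun w => w < v)) = ↑(xs.filter (fun w => w < v)) := by
    rw [Multiset.filter_coe]
  rw [hlist, Multiset.map_coe, Multiset.sum_coe, Int.toNat_of_nonneg hk0]
  rw [← hc]

-- (II) the bucket loop computes F on the clipped multiset
lemma bLoop_F (xs : List Int) : ∀ (fuel : Nat) (k v c k' v' c' : Int),
    1 ≤ v → 0 ≤ k → k < (clip (↑xs) v).sum →
    c = (((↑xs : Multiset Int).filter (fun w => v ≤ w)).card : Int) → 1 ≤ c →
    k < (fuel : Int) + c →
    bLoop (PySem.Dict.counter xs) fuel k v c = (k', v', c') →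
    ((xs.filter (fun w => w < v')).map (fun w => w * w)).sum
        + (c' - k') * v' * v' + k' * (v' - 1) * (v' - 1)
      = F k.toNat (clip (↑xs) v) := by
  intro fuel
  induction fuel with
  | zero =>
    intro k v c k' v' c' hv hk0 hksum hc hc1 hkf heq
    simp only [bLoop, Prod.mk.injEq] at heq
    obtain ⟨rfl, rfl, rfl⟩ := heq
    exact bStop xs k v c hv hk0 hc (by push_cast at hkf; omega)
  | succ fuel ih =>
    intro k v c k' v' c' hv hk0 hksum hc hc1 hkf heq
    by_cases hck : c ≤ k
    · simp only [bLoop, if_pos hck] at heq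
      have hgd : (PySem.Dict.counter xs).getD (v - 1) 0 = ((xs.count (v - 1) : Int)) :=
        PySem.Dict.getD_counter xs (v - 1)
      have hcnt0 : (0 : Int) ≤ (xs.count (v - 1) : Int) := Int.natCast_nonneg _
      have hsum' : k - c < (clip (↑xs) (v - 1)).sum := by
        rw [sum_clip_step]
        omega
      have hv' : 1 ≤ v - 1 :=
        max_pos_of_sum_pos (clip (↑xs) (v - 1)) (v - 1) (clip_ub _ _) (by omega)
      have hc' : c + (PySem.Dict.counter xs).getD (v - 1) 0
          = (((↑xs : Multiset Int).filter (fun w => (v - 1) ≤ w)).card : Int) := by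
        rw [hgd, card_filter_pred, hc]
        push_cast [Multiset.coe_count]
        ring
      have ihh := ih (k - c) (v - 1) (c + (PySem.Dict.counter xs).getD (v - 1) 0) k' v' c'
        hv' (by omega) hsum' hc' (by rw [hgd]; omega)
        (by rw [hgd]; push_cast at hkf ⊢; omega) heq
      rw [ihh]
      have hcnteq : (((clip (↑xs : Multiset Int) v).count v : Int)) = c := by
        rw [count_clip]; omega
      have h1 := F_chunk ((clip (↑xs : Multiset Int) v).count v) (clip (↑xs) v) v k.toNat
        hv (clip_ub _ v) rfl (by omega)
      have h2 : (k - c).toNat = k.toNat - (clip (↑xs : Multiset Int) v).count v := by omega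
      rw [h1, ← clip_step, h2]
    · simp only [bLoop, if_neg hck, Prod.mk.injEq] at heq
      obtain ⟨rfl, rfl, rfl⟩ := heq
      exact bStop xs k v c hv hk0 hc (by omega)

-- ===== VERDICT (by name: the statement is the Claim_ definition above) =====
theorem solution_spec : Claim_equal_solution := by
  unfold Claim_equal_solution
  intro n works _
  unfold Spec_solution solution solution_alt
  by_cases hs : works.sum ≤ n
  · simp [hs]
  · rw [if_neg hs, if_neg hs]
    by_cases hn : n ≤ 0
    · rw [if_pos hn]
      rw [show n.toNat = 0 from by omega]
      have hmm : (works.map (fun w => -w)).map (fun x : Int => -x) = works := by simp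
      rw [show heapLoop 0 (works.map (fun w => -w)) = works.map (fun w => -w) from rfl, hmm]
    · rw [if_neg hn]
      have hsum : n < works.sum := by omega
      have hn1 : 1 ≤ n := by omega
      -- A side
      have hWeq : Multiset.map (fun x : Int => -x) (↑(works.map (fun w => -w)) : Multiset Int)
          = (↑works : Multiset Int) := by
        rw [Multiset.map_coe, List.map_map]
        simp
      have hA := heapLoop_F n.toNat (works.map (fun w => -w)) (by
        rw [hWeq, Multiset.sum_coe]
        omega)
      rw [hA, hWeq]
      -- B side
      simp only [PySem.Dict.foldl_insert_getD_add_one_eq_counter]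
      rcases hm : PySem.List.max? works (fun x => x) with _ | v0
      · rw [PySem.List.max?_eq_none_iff] at hm
        subst hm
        simp at hs
        omega
      have hmem : v0 ∈ works := PySem.List.max?_mem hm
      have hub : ∀ y ∈ (↑works : Multiset Int), y ≤ v0 := by
        intro y hy
        exact PySem.List.max?_isMax hm y (by exact_mod_cast hy)
      have hv0 : 1 ≤ v0 :=
        max_pos_of_sum_pos (↑works) v0 hub (by rw [Multiset.sum_coe]; omega)
      have hclipW : clip (↑works) v0 = (↑works : Multiset Int) := by
        have h : Multiset.map (fun w => min w v0) (↑works : Multiset Int)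
            = Multiset.map id (↑works : Multiset Int) :=
          Multiset.map_congr rfl (fun x hx => by
            have := hub x hx
            simp only [id_eq]
            omega)
        rw [clip, h, Multiset.map_id]
      have hcinit : (PySem.Dict.counter works).getD v0 0
          = (((↑works : Multiset Int).filter (fun w => v0 ≤ w)).card : Int) := by
        rw [PySem.Dict.getD_counter]
        rw [show ((↑works : Multiset Int).filter (fun w => v0 ≤ w))
            = ((↑works : Multiset Int).filter (fun w => v0 = w)) from
          Multiset.filter_congr (fun x hx => by
            have := hub x hx
            constructor <;> intro <;> omega)]
        rw [← Multiset.count_eq_card_filter_eq, Multiset.coe_count]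
      have hcpos : 1 ≤ (PySem.Dict.counter works).getD v0 0 := by
        rw [PySem.Dict.getD_counter]
        have := List.count_pos_iff.mpr hmem
        omega
      rcases hbl : bLoop (PySem.Dict.counter works) n.toNat n v0
          ((PySem.Dict.counter works).getD v0 0) with ⟨k1, v1, c1⟩
      have hB := bLoop_F works n.toNat n v0 ((PySem.Dict.counter works).getD v0 0) k1 v1 c1
        hv0 (by omega) (by rw [hclipW, Multiset.sum_coe]; omega) hcinit hcpos
        (by omega) hbl
      rw [hclipW] at hB
      split
      next h => exact absurd h (by simp)
      next v0' h =>
        injection h with h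
        subst h
        simp only [hbl]
        exact hB.symm
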